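-- pv_equiv track=rewrite | github.com/bvhungit-crypto/ai-video-pipeline-TextToPrompt | core/quality_check.py | _has_flow_order
-- ===== SOURCE A (Python) =====
-- def _has_flow_order(content: list[str]) -> bool:
--     categories = []
--     for sentence in content:
--         lowered = sentence.lower()
--         if any(w in lowered for w in ("room", "space", "hallway", "street", "office", "factory")):
--             categories.append("environment")
--         if any(w in lowered for w in ("light", "shadow", "reflection")):
--             categories.append("light")
--         if any(w in lowered for w in ("moves", "drift", "shift", "settle", "flicker", "sway")):
--             categories.append("motion")
--         if any(w in lowered for w in ("camera", "frame", "shot")):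
--             categories.append("camera")
--     required = ["environment", "light", "motion", "camera"]
--     indices = []
--     for item in required:
--         if item not in categories:
--             return False
--         indices.append(categories.index(item))
--     return indices == sorted(indices)
-- ===== SOURCE B (Python) =====
-- def _has_flow_order(content: list[str]) -> bool:
--     groups = [
--         ("room", "space", "hallway", "street", "office", "factory"),
--         ("light", "shadow", "reflection"),
--         ("moves", "drift", "shift", "settle", "flicker", "sway"),
--         ("camera", "frame", "shot"),
--     ]
--     prev = -1
--     for keywords in groups:
--         idx = next((i for i, s in enumerate(content)
--                     if any(w in s.lower() for w in keywords)), None)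
--         if idx is None or idx < prev:
--             return False
--         prev = idx
--     return True
-- ===== Notes on version B (the rewrite author's own statement) =====
-- stated objective: faster
-- what changed: Replaces A's single pass that builds an interleaved category-tag list plus membership tests, list.index lookups and a sort with four independent first-match scans (one per category) that early-return on a missing or out-of-order category and track only the previous first-sentence index.
import Mathlib
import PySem

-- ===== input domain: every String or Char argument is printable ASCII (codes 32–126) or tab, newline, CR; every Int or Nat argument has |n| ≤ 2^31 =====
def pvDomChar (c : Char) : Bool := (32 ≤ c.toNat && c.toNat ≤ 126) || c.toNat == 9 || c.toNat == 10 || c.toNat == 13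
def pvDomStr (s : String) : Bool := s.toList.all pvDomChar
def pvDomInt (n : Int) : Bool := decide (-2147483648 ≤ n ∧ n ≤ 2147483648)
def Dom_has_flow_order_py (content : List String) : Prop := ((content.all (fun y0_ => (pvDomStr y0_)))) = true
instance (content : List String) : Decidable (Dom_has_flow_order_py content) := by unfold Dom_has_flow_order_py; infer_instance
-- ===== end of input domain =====

-- B replaces A's interleaved tag-list build + list.index lookups + sort by four independent
-- first-match scans (one per category) checking the first-sentence indices are non-decreasing.

-- ===== PORT A =====
-- second loop of A: for item in required: if item not in categories: return False;
-- indices.append(categories.index(item)); then indices == sorted(indices)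
def aRequiredLoop (required : List String) (categories : List String) (indices : List Nat) : Bool :=
  match required with
  | [] => decide (indices = PySem.List.sorted indices (fun x => x) false)
  | item :: rest =>
    match PySem.List.index? categories item with
    | none => false
    | some k => aRequiredLoop rest categories (indices ++ [k])

def has_flow_order_py (content : List String) : Bool :=
  let categories := content.foldl (fun acc sentence =>
    let lowered := PySem.Str.lower sentence
    let acc := if ["room","space","hallway","street","office","factory"].any
        (fun w => PySem.Str.isIn w lowered) then acc ++ ["environment"] else acc
    let acc := if ["light","shadow","reflection"].any
        (fun w => PySem.Str.isIn w lowered) then acc ++ ["light"] else acc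
    let acc := if ["moves","drift","shift","settle","flicker","sway"].any
        (fun w => PySem.Str.isIn w lowered) then acc ++ ["motion"] else acc
    let acc := if ["camera","frame","shot"].any
        (fun w => PySem.Str.isIn w lowered) then acc ++ ["camera"] else acc
    acc) []
  aRequiredLoop ["environment", "light", "motion", "camera"] categories []

-- ===== PORT B =====
def bHit (keywords : List String) (s : String) : Bool :=
  keywords.any (fun w => PySem.Str.isIn w (PySem.Str.lower s))

def bGroupsLoop (groups : List (List String)) (prev : Int) (content : List String) : Bool :=
  match groups with
  | [] => true
  | keywords :: rest =>
    match content.findIdx? (fun s => bHit keywords s) with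
    | none => false
    | some i => if (i : Int) < prev then false else bGroupsLoop rest (i : Int) content

def has_flow_order_py_alt (content : List String) : Bool :=
  bGroupsLoop
    [["room", "space", "hallway", "street", "office", "factory"],
     ["light", "shadow", "reflection"],
     ["moves", "drift", "shift", "settle", "flicker", "sway"],
     ["camera", "frame", "shot"]] (-1) content

-- ===== PRECONDITION & SPEC =====
def Spec_has_flow_order_py (content : List String) (out : Bool) : Prop := out = has_flow_order_py_alt content
instance (content : List String) (out : Bool) : Decidable (Spec_has_flow_order_py content out) := by unfold Spec_has_flow_order_py; infer_instance

-- ===== CLAIM (what is proved, stated in full; the proofs are below) =====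
def Claim_equal_has_flow_order_py : Prop := ∀ (content : List String), Dom_has_flow_order_py content → Spec_has_flow_order_py content (has_flow_order_py content)

-- ===== LEMMAS AND PROOFS =====

-- the per-sentence tags A appends, as a flatMap body
def tagsOf (s : String) : List String :=
  (if bHit ["room","space","hallway","street","office","factory"] s then ["environment"] else []) ++
  (if bHit ["light","shadow","reflection"] s then ["light"] else []) ++
  (if bHit ["moves","drift","shift","settle","flicker","sway"] s then ["motion"] else []) ++
  (if bHit ["camera","frame","shot"] s then ["camera"] else [])

-- common reference value: the four first-sentence indices, checked non-decreasing
def refCheck (o1 o2 o3 o4 : Option Nat) : Bool :=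
  match o1, o2, o3, o4 with
  | some a, some b, some c, some d => decide (a ≤ b) && decide (b ≤ c) && decide (c ≤ d)
  | _, _, _, _ => false

lemma index?_append_of_not_mem {α : Type} [DecidableEq α] (l t : List α) (v : α) (h : v ∉ l) :
    PySem.List.index? (l ++ t) v = (PySem.List.index? t v).map (· + l.length) := by
  induction l with
  | nil => simp [Option.map_id']
  | cons x xs ih =>
    have hx : x ≠ v := by rintro rfl; exact h (List.mem_cons_self)
    have hm : v ∉ xs := fun hv => h (List.mem_cons_of_mem _ hv)
    simp only [List.cons_append, PySem.List.index?_cons_of_ne _ hx, ih hm,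
      Option.map_map]
    rcases PySem.List.index? t v with _ | k <;> simp

lemma index?_flatMap_none_iff (t : String → List String) (f : String → Bool) (c : String)
    (hmem : ∀ s, c ∈ t s ↔ f s = true) (xs : List String) :
    PySem.List.index? (xs.flatMap t) c = none ↔ xs.findIdx? f = none := by
  simp only [PySem.List.index?_eq_none_iff, List.mem_flatMap, List.findIdx?_eq_none_iff]
  constructor
  · intro h s hs
    by_contra hf
    exact h ⟨s, hs, (hmem s).2 (by simpa using hf)⟩
  · rintro h ⟨s, hs, hc⟩
    exact absurd ((hmem s).1 hc) (by simp [h s hs])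

lemma index?_flatMap_order (t : String → List String) (f g : String → Bool) (c1 c2 : String)
    (hmem1 : ∀ s, c1 ∈ t s ↔ f s = true) (hmem2 : ∀ s, c2 ∈ t s ↔ g s = true)
    (horder : ∀ s i j, PySem.List.index? (t s) c1 = some i →
        PySem.List.index? (t s) c2 = some j → i < j) :
    ∀ (xs : List String) (i j u v : Nat),
      PySem.List.index? (xs.flatMap t) c1 = some i →
      PySem.List.index? (xs.flatMap t) c2 = some j →
      xs.findIdx? f = some u → xs.findIdx? g = some v →
      (i ≤ j ↔ u ≤ v) := by
  intro xs
  induction xs with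
  | nil => intro i j u v h1; simp at h1
  | cons s rest ih =>
    intro i j u v h1 h2 hu hv
    rw [List.flatMap_cons] at h1 h2
    rw [List.findIdx?_cons] at hu hv
    by_cases hf : f s = true
    · -- c1 ∈ t s: index? picks it inside t s
      have hc1 : c1 ∈ t s := (hmem1 s).2 hf
      rw [PySem.List.index?_append_of_mem _ hc1] at h1
      obtain ⟨hk, -, -⟩ := PySem.List.getElem_of_index?_eq_some h1
      rw [if_pos hf] at hu
      obtain rfl : u = 0 := by simpa using hu.symm
      by_cases hg : g s = true
      · have hc2 : c2 ∈ t s := (hmem2 s).2 hg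
        rw [PySem.List.index?_append_of_mem _ hc2] at h2
        rw [if_pos hg] at hv
        obtain rfl : v = 0 := by simpa using hv.symm
        have := horder s i j h1 h2
        constructor <;> intro <;> omega
      · have hc2 : c2 ∉ t s := fun hc => hg ((hmem2 s).1 hc)
        rw [index?_append_of_not_mem _ _ _ hc2] at h2
        rcases hj' : PySem.List.index? (rest.flatMap t) c2 with _ | j'
        · rw [hj'] at h2; simp at h2
        · rw [hj'] at h2
          obtain rfl : j = j' + (t s).length := by simpa using h2.symm
          rw [if_neg hg] at hv
          rcases hv' : rest.findIdx? g with _ | v'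
          · rw [hv'] at hv; simp at hv
          · rw [hv'] at hv
            obtain rfl : v = v' + 1 := by simpa using hv.symm
            constructor <;> intro <;> omega
    · have hc1 : c1 ∉ t s := fun hc => hf ((hmem1 s).1 hc)
      rw [index?_append_of_not_mem _ _ _ hc1] at h1
      rcases hi' : PySem.List.index? (rest.flatMap t) c1 with _ | i'
      · rw [hi'] at h1; simp at h1
      · rw [hi'] at h1
        obtain rfl : i = i' + (t s).length := by simpa using h1.symm
        rw [if_neg hf] at hu
        rcases hu' : rest.findIdx? f with _ | u'
        · rw [hu'] at hu; simp at hu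
        · rw [hu'] at hu
          obtain rfl : u = u' + 1 := by simpa using hu.symm
          by_cases hg : g s = true
          · -- c2 first appears in s, c1 only later: both sides false
            have hc2 : c2 ∈ t s := (hmem2 s).2 hg
            rw [PySem.List.index?_append_of_mem _ hc2] at h2
            obtain ⟨hk2, -, -⟩ := PySem.List.getElem_of_index?_eq_some h2
            rw [if_pos hg] at hv
            obtain rfl : v = 0 := by simpa using hv.symm
            constructor <;> intro <;> omega
          · have hc2 : c2 ∉ t s := fun hc => hg ((hmem2 s).1 hc)
            rw [index?_append_of_not_mem _ _ _ hc2] at h2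
            rcases hj' : PySem.List.index? (rest.flatMap t) c2 with _ | j'
            · rw [hj'] at h2; simp at h2
            · rw [hj'] at h2
              obtain rfl : j = j' + (t s).length := by simpa using h2.symm
              rw [if_neg hg] at hv
              rcases hv' : rest.findIdx? g with _ | v'
              · rw [hv'] at hv; simp at hv
              · rw [hv'] at hv
                obtain rfl : v = v' + 1 := by simpa using hv.symm
                have := ih i' j' u' v' hi' hj' hu' hv'
                constructor <;> intro <;> omega

lemma mem_tagsOf_env (s : String) :
    "environment" ∈ tagsOf s ↔ bHit ["room","space","hallway","street","office","factory"] s = true := by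
  unfold tagsOf; split_ifs <;> simp_all
lemma mem_tagsOf_light (s : String) :
    "light" ∈ tagsOf s ↔ bHit ["light","shadow","reflection"] s = true := by
  unfold tagsOf; split_ifs <;> simp_all
lemma mem_tagsOf_motion (s : String) :
    "motion" ∈ tagsOf s ↔ bHit ["moves","drift","shift","settle","flicker","sway"] s = true := by
  unfold tagsOf; split_ifs <;> simp_all
lemma mem_tagsOf_camera (s : String) :
    "camera" ∈ tagsOf s ↔ bHit ["camera","frame","shot"] s = true := by
  unfold tagsOf; split_ifs <;> simp_all

-- within one sentence, an earlier category's tag precedes a later one's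
lemma tagsOf_pair_order (s : String) (i j : Nat) (c1 c2 : String)
    (hpair : (c1, c2) ∈ [("environment","light"), ("light","motion"), ("motion","camera")]) :
    PySem.List.index? (tagsOf s) c1 = some i → PySem.List.index? (tagsOf s) c2 = some j → i < j := by
  unfold tagsOf
  fin_cases hpair <;>
    split_ifs <;> intro h1 h2 <;>
    simp_all [PySem.List.index?_eq_idxOf?, List.idxOf?, List.findIdx?, List.findIdx?.go] <;> omega

lemma sorted4_iff (a b c d : Nat) :
    ([a,b,c,d] = PySem.List.sorted [a,b,c,d] (fun x => x) false) ↔ (a ≤ b ∧ b ≤ c ∧ c ≤ d) := by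
  constructor
  · intro h
    have hp := PySem.List.sorted_pairwise [a,b,c,d] (fun x => x)
    rw [← h] at hp
    simp only [List.pairwise_cons, List.mem_cons, List.not_mem_nil] at hp
    refine ⟨hp.1 b (by simp), hp.2.1 c (by simp), hp.2.2.1 d (by simp)⟩
  · rintro ⟨h1, h2, h3⟩
    refine (PySem.List.sorted_eq_self_of_pairwise [a,b,c,d] (fun x => x) ?_).symm
    simp only [List.pairwise_cons, List.mem_cons, List.not_mem_nil]
    refine ⟨fun x hx => ?_, ⟨fun x hx => ?_, ⟨fun x hx => ?_,
      ⟨fun x hx => hx.elim, List.Pairwise.nil⟩⟩⟩⟩ <;>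
      (rcases hx with rfl | rfl | rfl | hx <;> first | omega | exact hx.elim)

-- A's foldl body appends exactly tagsOf
lemma cats_eq_flatMap (content : List String) :
    content.foldl (fun acc sentence =>
      let lowered := PySem.Str.lower sentence
      let acc := if ["room","space","hallway","street","office","factory"].any
          (fun w => PySem.Str.isIn w lowered) then acc ++ ["environment"] else acc
      let acc := if ["light","shadow","reflection"].any
          (fun w => PySem.Str.isIn w lowered) then acc ++ ["light"] else acc
      let acc := if ["moves","drift","shift","settle","flicker","sway"].any
          (fun w => PySem.Str.isIn w lowered) then acc ++ ["motion"] else acc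
      let acc := if ["camera","frame","shot"].any
          (fun w => PySem.Str.isIn w lowered) then acc ++ ["camera"] else acc
      acc) [] = content.flatMap tagsOf := by
  have hbody : (fun (acc : List String) (sentence : String) =>
      let lowered := PySem.Str.lower sentence
      let acc := if ["room","space","hallway","street","office","factory"].any
          (fun w => PySem.Str.isIn w lowered) then acc ++ ["environment"] else acc
      let acc := if ["light","shadow","reflection"].any
          (fun w => PySem.Str.isIn w lowered) then acc ++ ["light"] else acc
      let acc := if ["moves","drift","shift","settle","flicker","sway"].any
          (fun w => PySem.Str.isIn w lowered) then acc ++ ["motion"] else acc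
      let acc := if ["camera","frame","shot"].any
          (fun w => PySem.Str.isIn w lowered) then acc ++ ["camera"] else acc
      acc) = (fun acc sentence => acc ++ tagsOf sentence) := by
    funext acc sentence
    simp only [tagsOf, bHit]
    split_ifs <;> simp
  rw [hbody]
  simpa using PySem.List.foldl_append_eq_flatMap tagsOf content []

-- A equals the reference check of the four first-sentence indices
lemma a_eq_refCheck (content : List String) :
    has_flow_order_py content =
      refCheck (content.findIdx? (bHit ["room","space","hallway","street","office","factory"]))
               (content.findIdx? (bHit ["light","shadow","reflection"]))
               (content.findIdx? (bHit ["moves","drift","shift","settle","flicker","sway"]))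
               (content.findIdx? (bHit ["camera","frame","shot"])) := by
  unfold has_flow_order_py
  rw [cats_eq_flatMap]
  rcases h1 : PySem.List.index? (content.flatMap tagsOf) "environment" with _ | i1
  · rw [(index?_flatMap_none_iff tagsOf _ "environment" mem_tagsOf_env content).1 h1]
    simp only [aRequiredLoop, h1, refCheck]
  rcases hu1 : content.findIdx? (bHit ["room","space","hallway","street","office","factory"]) with _ | u1
  · rw [(index?_flatMap_none_iff tagsOf _ "environment" mem_tagsOf_env content).2 hu1] at h1
    cases h1
  rcases h2 : PySem.List.index? (content.flatMap tagsOf) "light" with _ | i2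
  · rw [(index?_flatMap_none_iff tagsOf _ "light" mem_tagsOf_light content).1 h2]
    simp only [aRequiredLoop, h1, h2, refCheck]
  rcases hu2 : content.findIdx? (bHit ["light","shadow","reflection"]) with _ | u2
  · rw [(index?_flatMap_none_iff tagsOf _ "light" mem_tagsOf_light content).2 hu2] at h2
    cases h2
  rcases h3 : PySem.List.index? (content.flatMap tagsOf) "motion" with _ | i3
  · rw [(index?_flatMap_none_iff tagsOf _ "motion" mem_tagsOf_motion content).1 h3]
    simp only [aRequiredLoop, h1, h2, h3, refCheck]
  rcases hu3 : content.findIdx? (bHit ["moves","drift","shift","settle","flicker","sway"]) with _ | u3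
  · rw [(index?_flatMap_none_iff tagsOf _ "motion" mem_tagsOf_motion content).2 hu3] at h3
    cases h3
  rcases h4 : PySem.List.index? (content.flatMap tagsOf) "camera" with _ | i4
  · rw [(index?_flatMap_none_iff tagsOf _ "camera" mem_tagsOf_camera content).1 h4]
    simp only [aRequiredLoop, h1, h2, h3, h4, refCheck]
  rcases hu4 : content.findIdx? (bHit ["camera","frame","shot"]) with _ | u4
  · rw [(index?_flatMap_none_iff tagsOf _ "camera" mem_tagsOf_camera content).2 hu4] at h4
    cases h4
  have o12 := index?_flatMap_order tagsOf _ _ "environment" "light" mem_tagsOf_env mem_tagsOf_light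
    (fun s i j => tagsOf_pair_order s i j _ _ (by simp)) content i1 i2 u1 u2 h1 h2 hu1 hu2
  have o23 := index?_flatMap_order tagsOf _ _ "light" "motion" mem_tagsOf_light mem_tagsOf_motion
    (fun s i j => tagsOf_pair_order s i j _ _ (by simp)) content i2 i3 u2 u3 h2 h3 hu2 hu3
  have o34 := index?_flatMap_order tagsOf _ _ "motion" "camera" mem_tagsOf_motion mem_tagsOf_camera
    (fun s i j => tagsOf_pair_order s i j _ _ (by simp)) content i3 i4 u3 u4 h3 h4 hu3 hu4
  simp only [aRequiredLoop, h1, h2, h3, h4, refCheck, List.nil_append]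
  simp only [List.nil_append, List.cons_append]
  rw [decide_eq_decide.2 (sorted4_iff i1 i2 i3 i4)]
  have : (i1 ≤ i2 ∧ i2 ≤ i3 ∧ i3 ≤ i4) ↔ (u1 ≤ u2 ∧ u2 ≤ u3 ∧ u3 ≤ u4) := by
    rw [o12, o23, o34]
  rw [decide_eq_decide.2 this]
  · simp [Bool.and_assoc]
  · infer_instance
  · infer_instance

-- B equals the same reference check
lemma b_eq_refCheck (content : List String) :
    has_flow_order_py_alt content =
      refCheck (content.findIdx? (bHit ["room","space","hallway","street","office","factory"]))
               (content.findIdx? (bHit ["light","shadow","reflection"]))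
               (content.findIdx? (bHit ["moves","drift","shift","settle","flicker","sway"]))
               (content.findIdx? (bHit ["camera","frame","shot"])) := by
  unfold has_flow_order_py_alt
  rcases h1 : content.findIdx? (bHit ["room","space","hallway","street","office","factory"]) with _ | u1 <;>
  rcases h2 : content.findIdx? (bHit ["light","shadow","reflection"]) with _ | u2 <;>
  rcases h3 : content.findIdx? (bHit ["moves","drift","shift","settle","flicker","sway"]) with _ | u3 <;>
  rcases h4 : content.findIdx? (bHit ["camera","frame","shot"]) with _ | u4 <;>
  simp only [bGroupsLoop, h1, h2, h3, h4, refCheck] <;>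
  (try rfl) <;>
  (split_ifs <;> simp_all <;> omega)

-- ===== VERDICT (by name: the statement is the Claim_ definition above) =====
theorem has_flow_order_py_spec : Claim_equal_has_flow_order_py := by
  intro content _
  unfold Spec_has_flow_order_py
  rw [a_eq_refCheck, b_eq_refCheck]
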